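-- pv_equiv track=rewrite | github.com/N-Wouda/Euro-NeurIPS-2022 | dynamic/utils.py | delta_cost
-- ===== SOURCE A (Python) =====
-- def delta_cost(route, distances):
--     """
--     Return the delta cost for each client on the route.
--     """
--     deltas = []
--
--     for idx, client in enumerate(route):
--         if len(route) == 1:
--             pred, succ = 0, 0
--         elif idx == 0:
--             pred, succ = 0, route[idx + 1]
--         elif idx == len(route) - 1:
--             pred, succ = route[idx - 1], 0
--         else:
--             pred, succ = route[idx - 1], route[idx + 1]
--
--         deltas.append(
--             distances[pred, client]
--             + distances[client, succ]
--             - distances[pred, succ]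
--         )
--
--     return deltas
-- ===== SOURCE B (Python) =====
-- def delta_cost(route, distances):
--     """
--     Return the delta cost for each client on the route.
--     """
--     def go(pred, rest):
--         if not rest:
--             return []
--         client, tail = rest[0], rest[1:]
--         succ = tail[0] if tail else 0
--         d = (
--             distances[pred, client]
--             + distances[client, succ]
--             - distances[pred, succ]
--         )
--         return [d] + go(client, tail)
--
--     return go(0, list(route))
-- ===== Notes on version B (the rewrite author's own statement) =====
-- stated objective: simpler
-- what changed: Replaces the indexed loop with a four-way boundary branch by a structural recursion over the route carrying the predecessor as an accumulator (the successor is the look-ahead head, depot 0 at both ends), so no indexing and no length comparisons remain.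
import Mathlib
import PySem

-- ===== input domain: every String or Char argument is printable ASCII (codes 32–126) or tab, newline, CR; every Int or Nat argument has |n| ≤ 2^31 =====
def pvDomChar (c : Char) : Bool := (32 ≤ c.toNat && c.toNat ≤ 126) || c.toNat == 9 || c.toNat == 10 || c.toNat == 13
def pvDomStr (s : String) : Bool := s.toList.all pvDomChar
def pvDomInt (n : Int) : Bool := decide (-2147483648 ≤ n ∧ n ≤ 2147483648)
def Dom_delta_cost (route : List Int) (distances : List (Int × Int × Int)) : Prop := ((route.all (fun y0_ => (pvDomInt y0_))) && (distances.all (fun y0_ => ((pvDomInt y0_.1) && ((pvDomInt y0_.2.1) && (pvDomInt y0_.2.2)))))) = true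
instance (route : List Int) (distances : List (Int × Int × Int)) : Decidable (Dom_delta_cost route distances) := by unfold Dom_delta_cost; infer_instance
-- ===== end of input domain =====

-- B replaces A's indexed loop with four-way boundary branch by a structural recursion
-- carrying the predecessor as an accumulator (successor = look-ahead head, depot at both ends); objective: simpler.
-- distances is a dict keyed by (i, j) pairs: entry (i, j, d) maps key (i, j) to d; lookup = first match.
def dlook (ds : List (Int × Int × Int)) (i j : Int) : Int :=
  (((ds.find? (fun e => e.1 == i && e.2.1 == j)).map (fun e => e.2.2)).getD 0)

-- ===== PORT A =====
def delta_cost (route : List Int) (distances : List (Int × Int × Int)) : List Int :=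
  (PySem.List.enumerate route).foldl (fun deltas pc =>
    let idx := pc.1
    let client := pc.2
    let ps : Int × Int :=
      if (route.length : Int) == 1 then (0, 0)
      else if idx == 0 then (0, PySem.List.pyGetD route (idx + 1) 0)
      else if idx == (route.length : Int) - 1 then (PySem.List.pyGetD route (idx - 1) 0, 0)
      else (PySem.List.pyGetD route (idx - 1) 0, PySem.List.pyGetD route (idx + 1) 0)
    deltas ++ [dlook distances ps.1 client + dlook distances client ps.2
                 - dlook distances ps.1 ps.2]) []

-- ===== PORT B =====
def dc_go (ds : List (Int × Int × Int)) (pred : Int) : List Int → List Int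
  | [] => []
  | client :: tail =>
    let succ : Int := match tail with | [] => 0 | s :: _ => s
    [dlook ds pred client + dlook ds client succ - dlook ds pred succ] ++ dc_go ds client tail

def delta_cost_alt (route : List Int) (distances : List (Int × Int × Int)) : List Int :=
  dc_go distances 0 route

-- ===== PRECONDITION & SPEC =====
-- Pre_: every (pred, client), (client, succ), (pred, succ) key the function looks up is present
-- in distances; on a missing key the Python A raises KeyError.
def Pre_delta_cost (route : List Int) (distances : List (Int × Int × Int)) : Prop :=
  (((0 :: route.dropLast).zip (route.zip (route.drop 1 ++ [0]))).all (fun t =>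
    (distances.find? (fun e => e.1 == t.1 && e.2.1 == t.2.1)).isSome &&
    (distances.find? (fun e => e.1 == t.2.1 && e.2.1 == t.2.2)).isSome &&
    (distances.find? (fun e => e.1 == t.1 && e.2.1 == t.2.2)).isSome)) = true
instance (route : List Int) (distances : List (Int × Int × Int)) : Decidable (Pre_delta_cost route distances) := by unfold Pre_delta_cost; infer_instance

def pvWitness_delta_cost : List Int × (List (Int × Int × Int)) :=
  ([1, 2], [(0, 1, 5), (1, 2, 3), (2, 0, 4), (0, 2, 6), (1, 0, 2)])

def Spec_delta_cost (route : List Int) (distances : List (Int × Int × Int)) (out : List Int) : Prop := out = delta_cost_alt route distances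
instance (route : List Int) (distances : List (Int × Int × Int)) (out : List Int) : Decidable (Spec_delta_cost route distances out) := by unfold Spec_delta_cost; infer_instance

-- ===== CLAIM (what is proved, stated in full; the proofs are below) =====
def Claim_equal_delta_cost : Prop := ∀ (route : List Int) (distances : List (Int × Int × Int)), Dom_delta_cost route distances → Pre_delta_cost route distances → Spec_delta_cost route distances (delta_cost route distances)

-- ===== LEMMAS AND PROOFS =====

-- proof-only intermediate form: the deltas as a map over (pred, client, succ) triples
def zf (ds : List (Int × Int × Int)) (pred : Int) (l : List Int) : List Int :=
  ((pred :: l.dropLast).zip (l.zip (l.drop 1 ++ [0]))).map (fun t =>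
    dlook ds t.1 t.2.1 + dlook ds t.2.1 t.2.2 - dlook ds t.1 t.2.2)

theorem pyGetD_get (xs : List Int) (i : Int) (k : Nat) (hk : k < xs.length) (hi : i = (k : Int)) :
    PySem.List.pyGetD xs i 0 = xs[k] := by
  subst hi
  rw [PySem.List.pyGetD_natCast]
  exact List.getD_eq_getElem xs 0 hk

theorem delta_cost_eq_zf (route : List Int) (ds : List (Int × Int × Int)) :
    delta_cost route ds = zf ds 0 route := by
  unfold delta_cost zf
  rw [PySem.List.foldl_append_singleton_eq_map]
  simp only [List.nil_append]
  apply List.ext_getElem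
  · simp [PySem.List.length_enumerate, List.length_zip, List.length_dropLast]
    omega
  · intro k hk1 hk2
    have hk : k < route.length := by
      simpa [PySem.List.length_enumerate] using hk1
    rw [List.getElem_map, List.getElem_map, PySem.List.getElem_enumerate,
        List.getElem_zip, List.getElem_zip]
    simp only [zero_add]
    have hpred : (0 :: route.dropLast)[k]'(by simp [List.length_dropLast]; omega)
        = if h0 : k = 0 then 0 else route[k - 1]'(by omega) := by
      rcases k with _ | k
      · simp
      · simp only [List.getElem_cons_succ]
        rw [List.getElem_dropLast]
        simp
    have hsucc : (route.drop 1 ++ [0])[k]'(by simp; omega)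
        = if h0 : k = route.length - 1 then 0 else route[k + 1]'(by omega) := by
      by_cases h0 : k = route.length - 1
      · rw [List.getElem_append_right (by simp; omega)]
        simp [h0]
      · rw [List.getElem_append_left (by simp; omega)]
        rw [List.getElem_drop]
        simp [h0]
        congr 1
        omega
    by_cases h1 : route.length = 1
    · have hk0 : k = 0 := by omega
      subst hk0
      simp [h1, hpred]
    · by_cases h2 : k = 0
      · subst h2
        have c1 : ¬ ((route.length : Int) == 1) = true := by simp; exact_mod_cast h1
        have hne : (0 : Nat) ≠ route.length - 1 := by omega
        simp only [Nat.cast_zero, c1, Bool.false_eq_true, if_false, beq_self_eq_true,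
          if_true, hpred, hsucc]
        rw [pyGetD_get route ((0 : Int) + 1) 1 (by omega) (by norm_num)]
        simp [hne]
      · by_cases h3 : k = route.length - 1
        · have c1 : ¬ ((route.length : Int) == 1) = true := by simp; exact_mod_cast h1
          have c2 : ¬ (((k : Int)) == 0) = true := by simp; exact_mod_cast h2
          have c3 : (((k : Int)) == (route.length : Int) - 1) = true := by
            simp; omega
          simp only [c1, c2, c3, Bool.false_eq_true, if_false, if_true, hpred, hsucc,
            dif_neg h2, dif_pos h3]
          rw [pyGetD_get route ((k : Int) - 1) (k - 1) (by omega) (by omega)]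
        · have c1 : ¬ ((route.length : Int) == 1) = true := by simp; exact_mod_cast h1
          have c2 : ¬ (((k : Int)) == 0) = true := by simp; exact_mod_cast h2
          have c3 : ¬ (((k : Int)) == (route.length : Int) - 1) = true := by
            simp; omega
          simp only [c1, c2, c3, Bool.false_eq_true, if_false, hpred, hsucc,
            dif_neg h2, dif_neg h3]
          rw [pyGetD_get route ((k : Int) - 1) (k - 1) (by omega) (by omega),
              pyGetD_get route ((k : Int) + 1) (k + 1) (by omega) (by push_cast; ring)]

theorem dc_go_eq_zf (ds : List (Int × Int × Int)) :
    ∀ (l : List Int) (pred : Int), dc_go ds pred l = zf ds pred l := by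
  intro l
  induction l with
  | nil => intro pred; simp [dc_go, zf]
  | cons c tl ih =>
    intro pred
    cases tl with
    | nil => simp [dc_go, zf]
    | cons s tl' =>
      have hL : dc_go ds pred (c :: s :: tl')
          = (dlook ds pred c + dlook ds c s - dlook ds pred s) :: dc_go ds c (s :: tl') := rfl
      rw [hL, ih c]
      simp [zf]

-- ===== VERDICT (by name: the statement is the Claim_ definition above) =====
theorem delta_cost_spec : Claim_equal_delta_cost := by
  intro route distances _ _
  unfold Spec_delta_cost delta_cost_alt
  rw [delta_cost_eq_zf, dc_go_eq_zf]
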